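-- pv_equiv track=rewrite | github.com/dheerujilagam/leetcode | Geek hates too many 1s - GFG/geek-hates-too-many-1s.py | noConseBits
-- ===== SOURCE A (Python) =====
-- def noConseBits(n : int) -> int:
--     # code here
--     s = list(bin(n)[2:])
--     cnt = 0
--     for i in range(len(s)):
--         if s[i] == "1":
--             if cnt == 2:
--                 s[i] = "0"
--                 cnt = 0
--             else:
--                 cnt += 1
--         else:
--             cnt = 0
--     return int("".join(s),2)
-- ===== SOURCE B (Python) =====
-- def noConseBits(n: int) -> int:
--     # Run-based rewrite: split the binary string into maximal runs of equal
--     # characters; inside each run of '1's clear every third bit (in-run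
--     # positions at stride three); '0' runs pass through unchanged.
--     s = bin(n)[2:]
--     pieces = []
--     i = 0
--     while i < len(s):
--         j = i
--         while j < len(s) and s[j] == s[i]:
--             j += 1
--         if s[i] == '1':
--             pieces.append(''.join('0' if k % 3 == 2 else '1' for k in range(j - i)))
--         else:
--             pieces.append(s[i:j])
--         i = j
--     return int(''.join(pieces), 2)
-- ===== Notes on version B (the rewrite author's own statement) =====
-- stated objective: alternative
-- what changed: Replaces the single stateful scan with a running counter by a two-level traversal: an outer loop over maximal runs of equal bits and an inner per-run stride that zeroes every third one-bit within each run; Pre_ excludes negative n, on which A raises ValueError (bin(n)[2:] keeps the 'b' of '-0b...').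
import Mathlib
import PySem

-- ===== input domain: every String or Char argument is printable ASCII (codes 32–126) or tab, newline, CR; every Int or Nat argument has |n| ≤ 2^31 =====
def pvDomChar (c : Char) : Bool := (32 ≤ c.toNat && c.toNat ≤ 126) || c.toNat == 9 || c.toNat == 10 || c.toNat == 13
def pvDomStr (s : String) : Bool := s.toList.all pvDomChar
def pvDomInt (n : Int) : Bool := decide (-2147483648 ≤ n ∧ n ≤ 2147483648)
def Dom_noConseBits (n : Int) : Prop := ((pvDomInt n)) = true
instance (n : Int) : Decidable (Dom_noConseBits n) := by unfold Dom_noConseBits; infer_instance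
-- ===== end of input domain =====

-- B replaces A's single counter-driven scan by an outer loop over maximal runs of
-- equal bits with an inner per-run stride (same cost; a different decomposition).


-- ===== PORT A =====
-- the for-loop of A: walks the characters once, carrying the counter `cnt`,
-- emitting each (possibly cleared) character in order
def aLoop : List Char → Nat → List Char
  | [], _ => []
  | c :: rest, cnt =>
    if c = '1' then
      if cnt = 2 then '0' :: aLoop rest 0
      else c :: aLoop rest (cnt + 1)
    else c :: aLoop rest 0

def noConseBits (n : Int) : Int :=
  let s := PySem.List.slice (PySem.Int.pyBin n).toList (some 2) none
  (PySem.Int.ofCharsBase? (aLoop s 0) 2).getD 0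

-- ===== PORT B =====
-- the outer while-loop of B: peel off one maximal run of equal characters,
-- process it (stride over a '1'-run, copy a '0'-run), recurse on the remainder
def bPieces : List Char → List Char
  | [] => []
  | c :: rest =>
    let run := rest.takeWhile (fun x => x = c)
    let rest' := rest.dropWhile (fun x => x = c)
    (if c = '1' then
      (List.range (run.length + 1)).map (fun k => if k % 3 = 2 then '0' else '1')
     else c :: run) ++ bPieces rest'
termination_by l => l.length
decreasing_by
  simp only [List.length_cons]
  exact Nat.lt_succ_of_le (List.length_dropWhile_le _ _)

def noConseBits_alt (n : Int) : Int :=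
  let s := PySem.List.slice (PySem.Int.pyBin n).toList (some 2) none
  (PySem.Int.ofCharsBase? (bPieces s) 2).getD 0

-- ===== PRECONDITION & SPEC =====
-- Pre_ excludes negative n: there bin(n)[2:] keeps the 'b' of '-0b…' and
-- int(…, 2) raises ValueError in A (and in B alike).
def Pre_noConseBits (n : Int) : Prop := 0 ≤ n
instance (n : Int) : Decidable (Pre_noConseBits n) := by unfold Pre_noConseBits; infer_instance
def pvWitness_noConseBits : Int := 14

def Spec_noConseBits (n : Int) (out : Int) : Prop := out = noConseBits_alt n
instance (n : Int) (out : Int) : Decidable (Spec_noConseBits n out) := by unfold Spec_noConseBits; infer_instance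

-- ===== CLAIM (what is proved, stated in full; the proofs are below) =====
def Claim_equal_noConseBits : Prop := ∀ (n : Int), Dom_noConseBits n → Pre_noConseBits n → Spec_noConseBits n (noConseBits n)

-- ===== LEMMAS AND PROOFS =====

-- A's counter is irrelevant when the next character is not '1'
theorem aLoop_reset (rest : List Char) (cnt : Nat)
    (h : ∀ x, rest.head? = some x → x ≠ '1') : aLoop rest cnt = aLoop rest 0 := by
  cases rest with
  | nil => rfl
  | cons x t =>
    have hx : x ≠ '1' := h x rfl
    simp [aLoop, hx]

-- A on a maximal run of ones: character i of the run is cleared iff (i + cnt) % 3 = 2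
theorem aLoop_ones (k : Nat) :
    ∀ (rest : List Char) (cnt : Nat), cnt < 3 →
    (∀ x, rest.head? = some x → x ≠ '1') →
    aLoop (List.replicate k '1' ++ rest) cnt =
      (List.range k).map (fun i => if (i + cnt) % 3 = 2 then '0' else '1') ++ aLoop rest 0 := by
  induction k with
  | zero => intro rest cnt _ h; simpa using aLoop_reset rest cnt h
  | succ k ih =>
    intro rest cnt hcnt h
    rw [List.replicate_succ, List.range_succ_eq_map]
    by_cases h2 : cnt = 2
    · subst h2
      have h1 : aLoop ('1' :: (List.replicate k '1' ++ rest)) 2 =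
          '0' :: aLoop (List.replicate k '1' ++ rest) 0 := by simp [aLoop]
      rw [List.cons_append, h1, ih rest 0 (by omega) h, List.map_cons, List.map_map,
        List.cons_append]
      congr 1
      congr 1
      apply List.map_congr_left
      intro i _
      have h3 : (i + 1 + 2) % 3 = (i + 0) % 3 := by omega
      simp only [Function.comp_apply, Nat.succ_eq_add_one, h3]
    · have h1 : aLoop ('1' :: (List.replicate k '1' ++ rest)) cnt =
          '1' :: aLoop (List.replicate k '1' ++ rest) (cnt + 1) := by simp [aLoop, h2]
      rw [List.cons_append, h1, ih rest (cnt + 1) (by omega) h, List.map_cons, List.map_map,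
        List.cons_append]
      congr 1
      · have h0 : ¬ (cnt % 3 = 2) := by omega
        simp [h0]
      · congr 1
        apply List.map_congr_left
        intro i _
        have h3 : (i + 1 + cnt) % 3 = (i + (cnt + 1)) % 3 := by omega
        simp only [Function.comp_apply, Nat.succ_eq_add_one, h3]

-- A on a run of any non-'1' character: copied unchanged, counter reset
theorem aLoop_other (k : Nat) (c : Char) (hc : c ≠ '1') :
    ∀ (rest : List Char) (cnt : Nat),
    aLoop (List.replicate (k + 1) c ++ rest) cnt =
      List.replicate (k + 1) c ++ aLoop rest 0 := by
  induction k with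
  | zero => intro rest cnt; simp [aLoop, hc]
  | succ k ih =>
    intro rest cnt
    rw [List.replicate_succ, List.cons_append]
    simp only [aLoop, if_neg hc]
    rw [ih rest 0, ← List.cons_append, ← List.replicate_succ]

theorem dropWhile_head_not {α : Type} (p : α → Bool) (l : List α) :
    ∀ x, (l.dropWhile p).head? = some x → p x = false := by
  induction l with
  | nil => intro x h; simp at h
  | cons a t ih =>
    intro x h
    by_cases ha : p a
    · exact ih x (by simpa [List.dropWhile, ha] using h)
    · simp only [List.dropWhile, ha] at h
      simp only [List.head?_cons, Option.some.injEq] at h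
      subst h; simpa using ha

theorem takeWhile_eq_replicate (c : Char) (l : List Char) :
    l.takeWhile (fun x => x = c) = List.replicate (l.takeWhile (fun x => x = c)).length c := by
  apply List.eq_replicate_of_mem
  intro b hb
  have := List.mem_takeWhile_imp hb
  simpa using this

theorem aLoop_eq_bPieces : ∀ (N : Nat) (s : List Char), s.length ≤ N → aLoop s 0 = bPieces s := by
  intro N
  induction N with
  | zero =>
    intro s h
    have : s = [] := List.eq_nil_of_length_eq_zero (Nat.le_zero.mp h)
    subst this; simp [aLoop, bPieces]
  | succ N ih =>
    intro s h
    cases s with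
    | nil => simp [aLoop, bPieces]
    | cons c rest =>
      have hsplit : c :: rest =
          List.replicate ((rest.takeWhile (fun x => x = c)).length + 1) c ++
            rest.dropWhile (fun x => x = c) := by
        rw [List.replicate_succ, List.cons_append]
        congr 1
        conv_lhs => rw [← List.takeWhile_append_dropWhile (p := fun x => x = c) (l := rest)]
        congr 1
        exact takeWhile_eq_replicate c rest
      have hlen : (rest.dropWhile (fun x => x = c)).length ≤ N := by
        have := List.length_dropWhile_le (fun x => x = c) rest
        simp only [List.length_cons] at h
        omega
      have hrec := ih _ hlen
      by_cases hc : c = '1'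
      · subst hc
        have hhead : ∀ x, (rest.dropWhile (fun x => x = '1')).head? = some x → x ≠ '1' := by
          intro x hx
          have := dropWhile_head_not (fun x => x = '1') rest x hx
          simpa using this
        conv_lhs => rw [hsplit]
        rw [aLoop_ones _ _ 0 (by omega) hhead, hrec]
        simp [bPieces]
      · conv_lhs => rw [hsplit]
        rw [aLoop_other _ c hc, hrec]
        simp only [bPieces, if_neg hc]
        rw [List.replicate_succ, List.cons_append]
        congr 2
        exact (takeWhile_eq_replicate c rest).symm

-- ===== VERDICT (by name: the statement is the Claim_ definition above) =====
theorem noConseBits_spec : Claim_equal_noConseBits := by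
  intro n _ _
  unfold Spec_noConseBits noConseBits noConseBits_alt
  simp only []
  rw [aLoop_eq_bPieces _ _ (Nat.le_refl _)]
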